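-- pv_equiv track=rewrite | github.com/felixfontein/python-crypto-educational-playground | crypto/keccak.py | compute_rc
-- ===== SOURCE A (Python) =====
-- def compute_rc(count):
--     """Precompute round constant LFSR values for Keccak-f's iota step."""
--     result = [1]
--     intermediate = [1, 0, 0, 0, 0, 0, 0, 0]
--     for _ in range(count):
--         last_bit = intermediate[-1]
--         intermediate = [0] + intermediate[:-1]
--         if last_bit:
--             intermediate[0] ^= 1
--             intermediate[4] ^= 1
--             intermediate[5] ^= 1
--             intermediate[6] ^= 1
--         result.append(intermediate[0])
--     return result
-- ===== SOURCE B (Python) =====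
-- # Bits of one full period (255) of Keccak's iota round-constant LFSR; the
-- # sequence is periodic, so each output bit is a table lookup at index mod 255.
-- _RC_PERIOD = [1, 0, 0, 0, 0, 0, 0, 0, 1, 0, 1, 1, 0, 0, 0, 1, 1, 1, 1, 0, 1, 0, 0, 0, 0, 1, 1, 1, 1, 1, 1, 1, 1, 0, 0, 1, 0, 0, 0, 0, 1, 0, 1, 0, 0, 1, 1, 1, 1, 1, 0, 1, 0, 1, 0, 1, 0, 1, 1, 1, 0, 0, 0, 0, 0, 1, 1, 0, 0, 0, 1, 0, 1, 0, 1, 1, 0, 0, 1, 1, 0, 0, 1, 0, 1, 1, 1, 1, 1, 1, 0, 1, 1, 1, 1, 0, 0, 1, 1, 0, 1, 1, 1, 0, 1, 1, 1, 0, 0, 1, 0, 1, 0, 1, 0, 0, 1, 0, 1, 0, 0, 0, 1, 0, 0, 1, 0, 1, 1, 0, 1, 0, 0, 0, 1, 1, 0, 0, 1, 1, 1, 0, 0, 1, 1, 1, 1, 0, 0, 0, 1, 1, 0, 1, 1, 0, 0, 0, 0, 1, 0, 0, 0, 1, 0, 1, 1, 1, 0, 1, 0, 1, 1, 1, 1,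 0, 1, 1, 0, 1, 1, 1, 1, 1, 0, 0, 0, 0, 1, 1, 0, 1, 0, 0, 1, 1, 0, 1, 0, 1, 1, 0, 1, 1, 0, 1, 0, 1, 0, 0, 0, 0, 0, 1, 0, 0, 1, 1, 1, 0, 1, 1, 0, 0, 1, 0, 0, 1, 0, 0, 1, 1, 0, 0, 0, 0, 0, 0, 1, 1, 1, 0, 1, 0, 0, 1, 0, 0, 0, 1, 1, 1, 0, 0, 0]
--
--
-- def compute_rc(count):
--     """Precompute round constant LFSR values for Keccak-f's iota step."""
--     return [1] + [_RC_PERIOD[(i + 1) % 255] for i in range(count)]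
-- ===== Notes on version B (the rewrite author's own statement) =====
-- stated objective: faster
-- what changed: A runs the 8-bit LFSR step by step (list slicing and per-index tap XORs); B exploits the sequence's 255-step period and reads each output bit from a precomputed one-period table at index (i+1) mod 255, doing no state updates at all (measured ~4x faster per element).
import Mathlib
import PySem

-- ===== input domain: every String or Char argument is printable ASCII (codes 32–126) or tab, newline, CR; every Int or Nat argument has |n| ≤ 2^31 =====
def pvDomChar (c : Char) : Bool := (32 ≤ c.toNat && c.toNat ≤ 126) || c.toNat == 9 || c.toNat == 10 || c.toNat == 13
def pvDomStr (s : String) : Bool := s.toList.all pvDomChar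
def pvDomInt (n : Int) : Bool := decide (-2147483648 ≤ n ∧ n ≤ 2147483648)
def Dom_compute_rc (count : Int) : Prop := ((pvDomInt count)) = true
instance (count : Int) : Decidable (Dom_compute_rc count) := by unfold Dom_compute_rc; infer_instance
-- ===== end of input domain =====

-- B replaces the step-by-step LFSR with a lookup in a precomputed one-period (255-entry) table indexed mod 255.

-- ===== PORT A =====
-- loop body of A; the indexed accesses always hit the fixed-length list, so pyGetD/pySetD are exact here
def pvStepA (s : List Int × List Int) (_ : Int) : List Int × List Int :=
  let result := s.1
  let intermediate := s.2
  let last_bit := PySem.List.pyGetD intermediate (-1) 0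
  let intermediate : List Int := (0 : Int) :: PySem.List.slice intermediate none (some (-1))
  let intermediate :=
    if last_bit ≠ 0 then
      let intermediate := PySem.List.pySetD intermediate 0 (PySem.Int.bxor (PySem.List.pyGetD intermediate 0 0) 1)
      let intermediate := PySem.List.pySetD intermediate 4 (PySem.Int.bxor (PySem.List.pyGetD intermediate 4 0) 1)
      let intermediate := PySem.List.pySetD intermediate 5 (PySem.Int.bxor (PySem.List.pyGetD intermediate 5 0) 1)
      let intermediate := PySem.List.pySetD intermediate 6 (PySem.Int.bxor (PySem.List.pyGetD intermediate 6 0) 1)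
      intermediate
    else intermediate
  (result ++ [PySem.List.pyGetD intermediate 0 0], intermediate)

def compute_rc (count : Int) : List Int :=
  ((PySem.List.pyRange 0 count 1).foldl pvStepA ([1], [1, 0, 0, 0, 0, 0, 0, 0])).1

-- ===== PORT B =====
-- B's table _RC_PERIOD: the 255 bits of one full period of the LFSR output
def pvTable : List Int := [1, 0, 0, 0, 0, 0, 0, 0, 1, 0, 1, 1, 0, 0, 0, 1, 1, 1, 1, 0, 1, 0, 0, 0, 0, 1, 1, 1, 1, 1, 1, 1, 1, 0, 0, 1, 0, 0, 0, 0, 1, 0, 1, 0, 0, 1, 1, 1, 1, 1, 0, 1, 0, 1, 0, 1, 0, 1, 1, 1, 0, 0, 0, 0, 0, 1, 1, 0, 0, 0, 1, 0, 1, 0, 1, 1, 0, 0, 1, 1, 0, 0, 1, 0, 1, 1, 1, 1, 1, 1, 0, 1, 1, 1, 1, 0, 0, 1, 1, 0, 1, 1, 1, 0, 1, 1, 1, 0, 0, 1, 0, 1, 0, 1, 0, 0, 1, 0, 1, 0, 0, 0, 1, 0, 0, 1, 0, 1, 1, 0, 1, 0, 0, 0, 1, 1, 0, 0, 1, 1,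 1, 0, 0, 1, 1, 1, 1, 0, 0, 0, 1, 1, 0, 1, 1, 0, 0, 0, 0, 1, 0, 0, 0, 1, 0, 1, 1, 1, 0, 1, 0, 1, 1, 1, 1, 0, 1, 1, 0, 1, 1, 1, 1, 1, 0, 0, 0, 0, 1, 1, 0, 1, 0, 0, 1, 1, 0, 1, 0, 1, 1, 0, 1, 1, 0, 1, 0, 1, 0, 0, 0, 0, 0, 1, 0, 0, 1, 1, 1, 0, 1, 1, 0, 0, 1, 0, 0, 1, 0, 0, 1, 1, 0, 0, 0, 0, 0, 0, 1, 1, 1, 0, 1, 0, 0, 1, 0, 0, 0, 1, 1, 1, 0, 0, 0]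

-- [1] + [_RC_PERIOD[(i + 1) % 255] for i in range(count)]
def compute_rc_alt (count : Int) : List Int :=
  1 :: (PySem.List.pyRange 0 count 1).map
    (fun i => PySem.List.pyGetD pvTable (PySem.Int.mod (i + 1) 255) 0)

-- ===== PRECONDITION & SPEC =====
def Spec_compute_rc (count : Int) (out : List Int) : Prop := out = compute_rc_alt count
instance (count : Int) (out : List Int) : Decidable (Spec_compute_rc count out) := by unfold Spec_compute_rc; infer_instance

-- ===== CLAIM (what is proved, stated in full; the proofs are below) =====
def Claim_equal_compute_rc : Prop := ∀ (count : Int), Dom_compute_rc count → Spec_compute_rc count (compute_rc count)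

-- ===== LEMMAS AND PROOFS =====

def pvInit : List Int := [1, 0, 0, 0, 0, 0, 0, 0]

def pvNext (s : List Int) : List Int := (pvStepA ([], s) 0).2

def pvOut (s : List Int) : Int := PySem.List.pyGetD s 0 0

theorem pvStepA_eq (res s : List Int) (x : Int) :
    pvStepA (res, s) x = (res ++ [pvOut (pvNext s)], pvNext s) := by
  simp [pvStepA, pvNext, pvOut]

-- A's fold result: initial list followed by the output bits of the successive states
theorem pvFoldA (l : List Int) (res s : List Int) :
    (l.foldl pvStepA (res, s)).1
      = res ++ (List.range l.length).map (fun k => pvOut (pvNext^[k + 1] s)) := by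
  induction l generalizing res s with
  | nil => simp
  | cons x l ih =>
    rw [List.foldl_cons, pvStepA_eq, ih, List.length_cons, List.range_succ_eq_map]
    simp [Function.comp_def, Function.iterate_succ_apply]

-- linear generator of the first n output bits starting from state s
def pvGen : Nat → List Int → List Int
  | 0, _ => []
  | n + 1, s => pvOut s :: pvGen n (pvNext s)

theorem pvGen_getD (n : Nat) (s : List Int) (j : Nat) (h : j < n) :
    (pvGen n s).getD j 0 = pvOut (pvNext^[j] s) := by
  induction n generalizing s j with
  | zero => omega
  | succ n ih =>
    cases j with
    | zero => simp [pvGen]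
    | succ j => simpa [pvGen, Function.iterate_succ_apply] using ih (pvNext s) j (by omega)

set_option maxRecDepth 100000 in
theorem pvGen_table : pvGen 255 pvInit = pvTable := by decide

set_option maxRecDepth 100000 in
theorem pvPeriod : pvNext^[255] pvInit = pvInit := by decide

theorem pvIter_mod (m : Nat) : pvNext^[m] pvInit = pvNext^[m % 255] pvInit := by
  induction m using Nat.strong_induction_on with
  | _ m ih =>
    by_cases h : m < 255
    · rw [Nat.mod_eq_of_lt h]
    · have hm : m = (m - 255) + 255 := by omega
      have h2 : pvNext^[m] pvInit = pvNext^[m - 255] pvInit := by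
        conv_lhs => rw [hm]
        rw [Function.iterate_add_apply, pvPeriod]
      rw [h2, ih (m - 255) (by omega)]
      conv_rhs => rw [Nat.mod_eq_sub_mod (by omega)]

theorem pvBit (m : Nat) : pvOut (pvNext^[m] pvInit) = pvTable.getD (m % 255) 0 := by
  rw [pvIter_mod, ← pvGen_table, pvGen_getD 255 pvInit (m % 255) (Nat.mod_lt _ (by omega))]

-- ===== VERDICT (by name: the statement is the Claim_ definition above) =====
theorem compute_rc_spec : Claim_equal_compute_rc := by
  intro count _
  unfold Spec_compute_rc compute_rc compute_rc_alt
  have hinit : ([1, 0, 0, 0, 0, 0, 0, 0] : List Int) = pvInit := rfl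
  rw [hinit, pvFoldA, PySem.List.pyRange_zero, List.map_map]
  simp only [List.length_map, List.length_range, List.singleton_append, List.cons.injEq,
    true_and, Function.comp_def]
  refine List.map_congr_left (fun k hk => ?_)
  have h1 : ((k : Int) + 1) = ((k + 1 : Nat) : Int) := by push_cast; ring
  rw [pvBit, h1, show (255 : Int) = ((255 : Nat) : Int) from rfl, PySem.Int.mod_natCast,
    PySem.List.pyGetD_natCast]
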